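-- pv_equiv track=rewrite | github.com/tatsukikitamura/Atcoder | Algorism/job/m3/1.py | solution
-- ===== SOURCE A (Python) =====
-- def solution(text):
--     count = []
--     LIST = []
--     use = []
--     for x in text:
--         if x == " ":
--             LIST.append(use)
--             use = []
--         elif x == ".":
--             LIST.append(use)
--             use = []
--         else:
--             use.append(x)
--     LIST.append(use)
--
--     for x in range(len(LIST)):
--         if  len(LIST[x]) > 0 and (LIST[x][0].isupper() or LIST[x][0].isdigit()):
--             count.append(LIST[x])
--
--     use1 = set(tuple(row) for row in count)
--
--     return len(use1)
-- ===== SOURCE B (Python) =====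
-- def solution(text):
--     seen = []
--     s = text
--     while True:
--         cut = len(s)
--         for i, c in enumerate(s):
--             if c == ' ' or c == '.':
--                 cut = i
--                 break
--         w = s[:cut]
--         if w and (w[0].isupper() or w[0].isdigit()) and w not in seen:
--             seen.append(w)
--         if cut == len(s):
--             return len(seen)
--         s = s[cut + 1:]
-- ===== Notes on version B (the rewrite author's own statement) =====
-- stated objective: alternative
-- what changed: B never builds a token list or a set: it repeatedly searches for the next delimiter, slices the word off the front of the remaining string, and deduplicates by ordered list membership of first occurrences, returning the length of that list.
import Mathlib
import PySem

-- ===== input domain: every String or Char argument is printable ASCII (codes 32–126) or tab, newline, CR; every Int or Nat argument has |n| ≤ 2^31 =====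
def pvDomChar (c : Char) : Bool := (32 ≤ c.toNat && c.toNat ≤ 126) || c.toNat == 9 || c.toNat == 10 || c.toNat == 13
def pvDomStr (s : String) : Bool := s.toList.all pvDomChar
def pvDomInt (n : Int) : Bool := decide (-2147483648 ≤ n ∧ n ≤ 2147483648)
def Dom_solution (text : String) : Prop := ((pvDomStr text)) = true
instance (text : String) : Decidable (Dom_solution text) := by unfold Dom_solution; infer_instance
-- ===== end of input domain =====

-- B avoids A's token list / filter pass / set-of-tuples: it slices one word at a time
-- off the front of the string and deduplicates by ordered list membership ('alternative').

-- ===== PORT A =====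
-- literal port: build LIST of words (as List Char) with a carry 'use', then an
-- index loop filters rows whose first char is upper/digit, then dedup via set.
def solution (text : String) : Int :=
  let st := text.toList.foldl
    (fun (st : List (List Char) × List Char) x =>
      if x = ' ' then (st.1 ++ [st.2], [])
      else if x = '.' then (st.1 ++ [st.2], [])
      else (st.1, st.2 ++ [x])) ([], [])
  let LIST := st.1 ++ [st.2]
  -- LIST[x][0] is guarded by len(LIST[x]) > 0, so pyGetD's default is never used
  let count := (PySem.List.pyRange 0 (LIST.length : Int) 1).foldl
    (fun acc j =>
      let row := PySem.List.pyGetD LIST j []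
      if decide (0 < row.length) &&
         (PySem.Chars.isupper (PySem.List.pyGetD row 0 ' ') ||
          PySem.Chars.isdigit (PySem.List.pyGetD row 0 ' '))
      then acc ++ [row] else acc) []
  let use1 : PySem.Set (List Char) := PySem.Set.ofList count
  (use1.length : Int)

-- ===== PORT B =====
-- the inner 'for i, c in enumerate(s): if c == ' ' or c == '.': cut = i; break'
-- with cut initialised to len(s)
def pvCut : List Char → Nat
  | [] => 0
  | c :: cs => if c = ' ' || c = '.' then 0 else pvCut cs + 1

lemma pvCut_le (cs : List Char) : pvCut cs ≤ cs.length := by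
  induction cs with
  | nil => simp [pvCut]
  | cons c cs ih => simp only [pvCut, List.length_cons]; split <;> omega

-- 'w and (w[0].isupper() or w[0].isdigit())'
def pvGood (w : List Char) : Bool :=
  match w with
  | [] => false
  | c :: _ => PySem.Chars.isupper c || PySem.Chars.isdigit c

-- the while-loop of Source B, as recursion on the shrinking remainder s
def pvGo (s : List Char) (seen : List (List Char)) : Int :=
  let cut := pvCut s
  let w := s.take cut
  let seen' := if pvGood w && !seen.contains w then seen ++ [w] else seen
  if h : cut = s.length then (seen'.length : Int)
  else pvGo (s.drop (cut + 1)) seen'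
termination_by s.length
decreasing_by
  have := pvCut_le s
  simp only [List.length_drop]
  omega

def solution_alt (text : String) : Int := pvGo text.toList []

-- ===== PRECONDITION & SPEC =====
def Spec_solution (text : String) (out : Int) : Prop := out = solution_alt text
instance (text : String) (out : Int) : Decidable (Spec_solution text out) := by unfold Spec_solution; infer_instance

-- ===== CLAIM (what is proved, stated in full; the proofs are below) =====
def Claim_equal_solution : Prop := ∀ (text : String), Dom_solution text → Spec_solution text (solution text)

-- ===== LEMMAS AND PROOFS =====

-- the common word list, structured like A's fold
def splitW (u : List Char) : List Char → List (List Char)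
  | [] => [u]
  | c :: cs =>
    if c = ' ' then u :: splitW [] cs
    else if c = '.' then u :: splitW [] cs
    else splitW (u ++ [c]) cs

-- A's fold produces exactly L ++ splitW u cs (after appending the carry)
lemma A_fold_eq (cs : List Char) (L : List (List Char)) (u : List Char) :
    (cs.foldl
      (fun (st : List (List Char) × List Char) x =>
        if x = ' ' then (st.1 ++ [st.2], [])
        else if x = '.' then (st.1 ++ [st.2], [])
        else (st.1, st.2 ++ [x])) (L, u)).1
    ++ [(cs.foldl
      (fun (st : List (List Char) × List Char) x =>
        if x = ' ' then (st.1 ++ [st.2], [])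
        else if x = '.' then (st.1 ++ [st.2], [])
        else (st.1, st.2 ++ [x])) (L, u)).2]
    = L ++ splitW u cs := by
  induction cs generalizing L u with
  | nil => simp [splitW]
  | cons c cs ih =>
    by_cases h1 : c = ' '
    · subst h1; simp [List.foldl_cons, splitW, ih]
    · by_cases h2 : c = '.'
      · subst h2; simp [List.foldl_cons, splitW, ih]
      · simp only [List.foldl_cons, if_neg h1, if_neg h2, splitW, ih]

lemma pvGood_eq (row : List Char) :
    (decide (0 < row.length) &&
      (PySem.Chars.isupper (PySem.List.pyGetD row 0 ' ') ||
       PySem.Chars.isdigit (PySem.List.pyGetD row 0 ' '))) = pvGood row := by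
  cases row <;> simp [pvGood, PySem.List.pyGetD, PySem.List.pyGet?, PySem.List.pyIdx?]

lemma ofList_append_singleton (l : List (List Char)) (x : List Char) :
    PySem.Set.ofList (l ++ [x]) = PySem.Set.add (PySem.Set.ofList l) x := by
  simp [PySem.Set.ofList_eq_foldl, List.foldl_append]

-- splitW splits at the first delimiter found by pvCut
lemma splitW_cut (cs : List Char) (u : List Char) :
    splitW u cs =
      if pvCut cs = cs.length then [u ++ cs]
      else (u ++ cs.take (pvCut cs)) :: splitW [] (cs.drop (pvCut cs + 1)) := by
  induction cs generalizing u with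
  | nil => simp [splitW, pvCut]
  | cons c cs ih =>
    by_cases hd : c = ' ' || c = '.'
    · have h0 : pvCut (c :: cs) = 0 := by simp [pvCut, hd]
      have hne : pvCut (c :: cs) ≠ (c :: cs).length := by simp [h0]
      rw [if_neg hne, h0]
      by_cases hsp : c = ' '
      · subst hsp; simp [splitW]
      · have hdot : c = '.' := by
          rcases Bool.or_eq_true_iff.mp hd with h | h
          · exact absurd (by simpa using h) hsp
          · simpa using h
        subst hdot; simp [splitW, hsp]
    · have h1 : ¬ c = ' ' := by intro h; simp [h] at hd
      have h2 : ¬ c = '.' := by intro h; simp [h] at hd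
      have hc : pvCut (c :: cs) = pvCut cs + 1 := by simp [pvCut, hd]
      rw [hc]
      simp only [splitW, if_neg h1, if_neg h2, List.length_cons]
      rw [ih (u ++ [c])]
      by_cases he : pvCut cs = cs.length
      · simp [he]
      · rw [if_neg he, if_neg (by omega)]
        simp [List.append_assoc]

-- B's dedup step, in the Set vocabulary (the form simp leaves behind)
lemma addW_eq (seen : PySem.Set (List Char)) (w : List Char) :
    (if pvGood w = true ∧ w ∉ seen then seen ++ [w] else seen)
    = (if pvGood w then PySem.Set.add seen w else seen) := by
  by_cases hg : pvGood w
  · by_cases hc : w ∈ seen <;> simp [hg, hc, PySem.Set.add]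
  · simp [hg]

-- the same step in the Bool form the port writes
lemma addW_eqB (seen : List (List Char)) (w : List Char) :
    (if (pvGood w && !List.contains seen w) = true then seen ++ [w] else seen)
    = (if pvGood w then PySem.Set.add seen w else seen) := by
  rw [← addW_eq]; simp

-- B's recursion computes the fold of the dedup step over splitW [] cs
lemma pvGo_eq (cs : List Char) (seen : List (List Char)) :
    pvGo cs seen =
      (((splitW [] cs).foldl
        (fun s w => if pvGood w then PySem.Set.add s w else s) seen).length : Int) := by
  induction hn : cs.length using Nat.strong_induction_on generalizing cs seen with
  | _ n ih =>
    subst hn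
    rw [pvGo, splitW_cut]
    by_cases h : pvCut cs = cs.length
    · simp [h]
      rw [addW_eq]
    · rw [dif_neg h, if_neg h]
      have hlt : (cs.drop (pvCut cs + 1)).length < cs.length := by
        have := pvCut_le cs
        simp only [List.length_drop]; omega
      rw [ih _ hlt _ _ rfl]
      simp only [List.foldl_cons, List.nil_append]
      rw [addW_eqB]

-- folding the dedup step equals Set.ofList of the good words
lemma foldl_addW (ws : List (List Char)) (l : List (List Char)) :
    ws.foldl (fun s w => if pvGood w then PySem.Set.add s w else s) (PySem.Set.ofList l)
    = PySem.Set.ofList (l ++ ws.filter pvGood) := by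
  induction ws generalizing l with
  | nil => simp
  | cons w ws ih =>
    by_cases hg : pvGood w
    · rw [List.foldl_cons, if_pos hg, ← ofList_append_singleton, ih]
      simp [hg]
    · simp [List.foldl_cons, hg, ih]

lemma foldl_addW_nil (ws : List (List Char)) :
    ws.foldl (fun s w => if pvGood w then PySem.Set.add s w else s) []
    = PySem.Set.ofList (ws.filter pvGood) := by
  simpa using foldl_addW ws []

-- ===== VERDICT (by name: the statement is the Claim_ definition above) =====
theorem solution_spec : Claim_equal_solution := by
  intro text _
  unfold Spec_solution solution solution_alt
  rw [pvGo_eq, foldl_addW_nil]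
  set cs := text.toList
  set stA := cs.foldl
    (fun (st : List (List Char) × List Char) x =>
      if x = ' ' then (st.1 ++ [st.2], [])
      else if x = '.' then (st.1 ++ [st.2], [])
      else (st.1, st.2 ++ [x])) ([], []) with hstA
  dsimp only
  have hlist : stA.1 ++ [stA.2] = splitW [] cs := by
    rw [hstA, A_fold_eq, List.nil_append]
  have hcount : (PySem.List.pyRange 0 (((stA.1 ++ [stA.2]).length : Int)) 1).foldl
      (fun acc j =>
        let row := PySem.List.pyGetD (stA.1 ++ [stA.2]) j []
        if decide (0 < row.length) &&
           (PySem.Chars.isupper (PySem.List.pyGetD row 0 ' ') ||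
            PySem.Chars.isdigit (PySem.List.pyGetD row 0 ' '))
        then acc ++ [row] else acc) []
      = (stA.1 ++ [stA.2]).filter pvGood := by
    rw [PySem.List.foldl_pyRange_zero_pyGetD' (stA.1 ++ [stA.2]) []
      (fun acc row => if decide (0 < row.length) &&
           (PySem.Chars.isupper (PySem.List.pyGetD row 0 ' ') ||
            PySem.Chars.isdigit (PySem.List.pyGetD row 0 ' '))
        then acc ++ [row] else acc) []]
    have := PySem.List.foldl_congr_mem
      (f := fun (acc : List (List Char)) row => if decide (0 < row.length) &&
           (PySem.Chars.isupper (PySem.List.pyGetD row 0 ' ') ||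
            PySem.Chars.isdigit (PySem.List.pyGetD row 0 ' '))
        then acc ++ [row] else acc)
      (g := fun acc row => if pvGood row then acc ++ [row] else acc)
      (l := stA.1 ++ [stA.2]) (init := ([] : List (List Char)))
      (by intro acc x _; simp only [pvGood_eq])
    rw [this, PySem.List.foldl_append_if_eq_filter, List.nil_append]
  rw [hcount, hlist]
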